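-- pv_equiv track=rewrite | github.com/anonymousdejavu/dejavu | dejavu/utils/dataset.py | fill_list_to_length
-- ===== SOURCE A (Python) =====
-- def fill_list_to_length(a, num_frames):
--     """
--     Fill the list a to length 'frames' by repeating its elements.
--     The elements from the end of the list are repeated more if necessary.
--     """
--     filled_list = []
--     len_a = len(a)
--     repeats = num_frames // len_a  # Number of times the whole list can be repeated
--     additional_elements = num_frames % len_a  # Number of additional elements needed
--
--     for i in range(len_a):
--         # Repeat each element 'repeats' times or 'repeats + 1' times for the last few elements
--         repeat_times = repeats + 1 if i >= len_a - additional_elements else repeats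
--         filled_list.extend([a[i]] * repeat_times)
--
--     return filled_list
-- ===== SOURCE B (Python) =====
-- def fill_list_to_length(a, num_frames):
--     repeats, add = divmod(num_frames, len(a))
--     first = len(a) - add
--     L1 = first * repeats
--     out = []
--     for k in range(num_frames):
--         if k < L1:
--             i = k // repeats
--         else:
--             i = first + (k - L1) // (repeats + 1)
--         out.append(a[i])
--     return out
-- ===== Notes on version B (the rewrite author's own statement) =====
-- stated objective: alternative
-- what changed: B computes repeats/remainder once and builds the result in a single pass over output positions k, mapping each k arithmetically to a source index (two-block k//repeats formula), instead of A's per-element loop that extends the output with [a[i]]*count sublists.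
import Mathlib
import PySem

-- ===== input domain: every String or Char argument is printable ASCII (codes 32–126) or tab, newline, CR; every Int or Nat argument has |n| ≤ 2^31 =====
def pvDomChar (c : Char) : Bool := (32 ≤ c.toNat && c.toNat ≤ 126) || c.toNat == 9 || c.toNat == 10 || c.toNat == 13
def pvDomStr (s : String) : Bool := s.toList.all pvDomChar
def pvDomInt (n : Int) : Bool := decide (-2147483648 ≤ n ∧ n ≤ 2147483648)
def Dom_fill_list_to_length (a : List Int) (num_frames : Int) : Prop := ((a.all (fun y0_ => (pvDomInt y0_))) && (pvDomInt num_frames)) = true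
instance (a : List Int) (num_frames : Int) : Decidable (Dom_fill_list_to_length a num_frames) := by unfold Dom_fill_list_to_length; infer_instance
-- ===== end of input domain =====

-- B maps each output position to a source index in one pass instead of extending with repeated sublists per element (alternative decomposition, same cost).

-- ===== PORT A =====
def fill_list_to_length (a : List Int) (num_frames : Int) : List Int :=
  let len_a : Int := a.length
  let repeats := PySem.Int.floordiv num_frames len_a
  let additional_elements := PySem.Int.mod num_frames len_a
  (PySem.List.pyRange 0 len_a 1).foldl
    (fun filled_list i =>
      filled_list ++ PySem.List.pyRepeat [PySem.List.pyGetD a i 0]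
        (if i ≥ len_a - additional_elements then repeats + 1 else repeats)) []

-- ===== PORT B =====
def fill_list_to_length_alt (a : List Int) (num_frames : Int) : List Int :=
  let n : Int := a.length
  let repeats := PySem.Int.floordiv num_frames n
  let add := PySem.Int.mod num_frames n
  let first := n - add
  let L1 := first * repeats
  (PySem.List.pyRange 0 num_frames 1).foldl
    (fun out k =>
      out ++ [PySem.List.pyGetD a
        (if k < L1 then PySem.Int.floordiv k repeats
         else first + PySem.Int.floordiv (k - L1) (repeats + 1)) 0]) []

-- ===== PRECONDITION & SPEC =====
-- Pre_ excludes only the empty list, on which A raises ZeroDivisionError (num_frames % 0).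
def Pre_fill_list_to_length (a : List Int) (num_frames : Int) : Prop := a ≠ []
instance (a : List Int) (num_frames : Int) : Decidable (Pre_fill_list_to_length a num_frames) := by unfold Pre_fill_list_to_length; infer_instance
def pvWitness_fill_list_to_length : List Int × Int := ([1, 2], 5)

def Spec_fill_list_to_length (a : List Int) (num_frames : Int) (out : List Int) : Prop := out = fill_list_to_length_alt a num_frames
instance (a : List Int) (num_frames : Int) (out : List Int) : Decidable (Spec_fill_list_to_length a num_frames out) := by unfold Spec_fill_list_to_length; infer_instance

-- ===== CLAIM (what is proved, stated in full; the proofs are below) =====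
def Claim_equal_fill_list_to_length : Prop := ∀ (a : List Int) (num_frames : Int), Dom_fill_list_to_length a num_frames → Pre_fill_list_to_length a num_frames → Spec_fill_list_to_length a num_frames (fill_list_to_length a num_frames)

-- ===== LEMMAS AND PROOFS =====

-- A repeated block flattened equals an index-divided map.
lemma flatMap_replicate_eq_map_div (m r : Nat) (g : Nat → Int) :
    (List.range m).flatMap (fun i => List.replicate r (g i))
      = (List.range (m * r)).map (fun k => g (k / r)) := by
  induction m with
  | zero => simp
  | succ m ih =>
    rw [List.range_succ, List.flatMap_append, ih, Nat.succ_mul, List.range_add,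
      List.map_append, List.map_map]
    congr 1
    simp only [List.flatMap_cons, List.flatMap_nil, List.append_nil]
    rcases Nat.eq_zero_or_pos r with hr | hr
    · simp [hr]
    · have : ∀ k ∈ List.range r, ((fun k => g (k / r)) ∘ (fun x => m * r + x)) k = g m := by
        intro k hk
        simp only [Function.comp, List.mem_range] at hk ⊢
        rw [Nat.mul_comm, Nat.mul_add_div hr, Nat.div_eq_of_lt hk, Nat.add_zero]
      rw [List.map_congr_left this]
      simp

-- Nat-level core: A's per-element repetition equals B's position→index map.
lemma core_eq (n r s : Nat) (hs : s < n) (g : Nat → Int) :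
    (List.range n).flatMap (fun i => List.replicate (if n - s ≤ i then r + 1 else r) (g i))
      = (List.range (n * r + s)).map
          (fun k => g (if k < (n - s) * r then k / r
                       else (n - s) + (k - (n - s) * r) / (r + 1))) := by
  have hsn : s ≤ n := Nat.le_of_lt hs
  have hsplit : n = (n - s) + s := by omega
  have hM : n * r + s = (n - s) * r + s * (r + 1) := by
    have : (n - s) * r + s * (r + 1) = ((n - s) + s) * r + s := by ring
    rw [this, ← hsplit]
  rw [hM]
  conv_lhs => rw [hsplit]
  rw [List.range_add, List.flatMap_append, List.range_add, List.map_append, List.map_map]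
  simp only [Nat.add_sub_cancel]
  congr 1
  · -- first block
    have h1 : ∀ i ∈ List.range (n - s),
        (fun i => List.replicate (if n - s ≤ i then r + 1 else r) (g i)) i
          = (fun i => List.replicate r (g i)) i := by
      intro i hi
      simp only [List.mem_range] at hi
      simp [Nat.not_le.mpr hi]
    rw [List.flatMap_congr h1, flatMap_replicate_eq_map_div]
    apply List.map_congr_left
    intro k hk
    simp only [List.mem_range] at hk
    simp [hk]
  · -- second block
    have h2 : ∀ t ∈ List.range s,
        (fun t => List.replicate (if n - s ≤ n - s + t then r + 1 else r) (g (n - s + t))) t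
          = (fun t => List.replicate (r + 1) (g ((n - s) + t))) t := by
      intro t ht
      simp
    rw [List.flatMap_map]
    simp only [Function.comp_def]
    rw [List.flatMap_congr h2, flatMap_replicate_eq_map_div]
    apply List.map_congr_left
    intro j hj
    simp only [List.mem_range] at hj
    have hnotlt : ¬ ((n - s) * r + j < (n - s) * r) := by omega
    rw [if_neg hnotlt, Nat.add_sub_cancel_left]

lemma flatMap_congr' {α β : Type} (l : List α) (f g : α → List β)
    (h : ∀ x ∈ l, f x = g x) : l.flatMap f = l.flatMap g := List.flatMap_congr h

-- A's normal form on nonnegative num_frames.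
lemma A_norm (a : List Int) (M : Nat) (h : a ≠ []) :
    fill_list_to_length a (M : Int)
      = (List.range a.length).flatMap
          (fun i => List.replicate (if a.length - M % a.length ≤ i then M / a.length + 1 else M / a.length)
            (a.getD i 0)) := by
  have hn : 0 < a.length := List.length_pos_iff.mpr h
  unfold fill_list_to_length
  rw [PySem.List.foldl_append_eq_flatMap, List.nil_append, PySem.List.pyRange_zero_natCast,
    List.flatMap_map]
  apply flatMap_congr'
  intro i hi
  simp only [List.mem_range] at hi
  simp only [Function.comp, PySem.Int.floordiv_natCast, PySem.Int.mod_natCast,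
    PySem.List.pyGetD_natCast, PySem.List.pyRepeat_singleton, ge_iff_le]
  have hcast : ((a.length : Int) - ((M % a.length : Nat) : Int)) = ((a.length - M % a.length : Nat) : Int) := by
    have := Nat.mod_lt M hn
    push_cast
    omega
  rw [hcast]
  by_cases hc : a.length - M % a.length ≤ i
  · rw [if_pos (by exact_mod_cast hc), if_pos hc]
    congr 1
  · rw [if_neg (by exact_mod_cast hc), if_neg hc]
    congr 1

-- B's normal form on nonnegative num_frames.
lemma B_norm (a : List Int) (M : Nat) (h : a ≠ []) :
    fill_list_to_length_alt a (M : Int)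
      = (List.range M).map
          (fun k => a.getD
            (if k < (a.length - M % a.length) * (M / a.length) then k / (M / a.length)
             else (a.length - M % a.length) + (k - (a.length - M % a.length) * (M / a.length)) / (M / a.length + 1)) 0) := by
  have hn : 0 < a.length := List.length_pos_iff.mpr h
  have hlt := Nat.mod_lt M hn
  unfold fill_list_to_length_alt
  rw [PySem.List.foldl_append_singleton_eq_map, List.nil_append, PySem.List.pyRange_zero_natCast,
    List.map_map]
  apply List.map_congr_left
  intro k hk
  simp only [List.mem_range] at hk
  simp only [Function.comp, PySem.Int.floordiv_natCast, PySem.Int.mod_natCast,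
    PySem.List.pyGetD_natCast]
  have hcast : ((a.length : Int) - ((M % a.length : Nat) : Int)) = ((a.length - M % a.length : Nat) : Int) := by
    push_cast; omega
  rw [hcast]
  have hL1 : ((a.length - M % a.length : Nat) : Int) * ((M / a.length : Nat) : Int)
      = (((a.length - M % a.length) * (M / a.length) : Nat) : Int) := by push_cast; ring
  rw [hL1]
  by_cases hc : k < (a.length - M % a.length) * (M / a.length)
  · rw [if_pos (by exact_mod_cast hc), if_pos hc]
    rw [PySem.List.pyGetD_natCast]
  · rw [if_neg (by exact_mod_cast hc), if_neg hc]
    have hc' : (a.length - M % a.length) * (M / a.length) ≤ k := Nat.not_lt.mp hc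
    have hsub : ((k : Int) - (((a.length - M % a.length) * (M / a.length) : Nat) : Int))
        = ((k - (a.length - M % a.length) * (M / a.length) : Nat) : Int) := by
      omega
    rw [hsub]
    have : ((M / a.length : Nat) : Int) + 1 = (((M / a.length) + 1 : Nat) : Int) := by push_cast; ring
    rw [this, PySem.Int.floordiv_natCast]
    have hadd : ((a.length - M % a.length : Nat) : Int)
          + (((k - (a.length - M % a.length) * (M / a.length)) / (M / a.length + 1) : Nat) : Int)
        = (((a.length - M % a.length) + (k - (a.length - M % a.length) * (M / a.length)) / (M / a.length + 1) : Nat) : Int) := by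
      push_cast; ring
    rw [hadd, PySem.List.pyGetD_natCast]

-- ===== VERDICT (by name: the statement is the Claim_ definition above) =====
theorem fill_list_to_length_spec : Claim_equal_fill_list_to_length := by
  intro a num_frames _ hpre
  unfold Spec_fill_list_to_length
  have hn : 0 < a.length := List.length_pos_iff.mpr hpre
  rcases num_frames with M | M'
  · -- nonnegative: Int.ofNat M = ↑M
    show fill_list_to_length a (M : Int) = fill_list_to_length_alt a (M : Int)
    rw [A_norm a M hpre, B_norm a M hpre]
    have hM : a.length * (M / a.length) + M % a.length = M := Nat.div_add_mod M a.length
    have := core_eq a.length (M / a.length) (M % a.length) (Nat.mod_lt M hn) (fun i => a.getD i 0)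
    rw [hM] at this
    exact this
  · -- negative num_frames: both sides are []
    have hneg : (Int.negSucc M') < 0 := Int.negSucc_lt_zero M'
    have hpos : (0 : Int) < (a.length : Int) := by exact_mod_cast hn
    have hrep : PySem.Int.floordiv (Int.negSucc M') (a.length : Int) < 0 := by
      rw [PySem.Int.floordiv_eq_ediv_of_pos hpos]
      have h1 := Int.ediv_add_emod (Int.negSucc M') (a.length : Int)
      have h2 := Int.emod_nonneg (Int.negSucc M') (by omega : ((a.length : Int)) ≠ 0)
      nlinarith [Int.le_of_lt hneg, h1, h2, Int.emod_lt_of_pos (Int.negSucc M') hpos]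
    unfold fill_list_to_length fill_list_to_length_alt
    rw [PySem.List.pyRange_one_eq_nil (by omega : (Int.negSucc M') ≤ 0)]
    simp only [List.foldl_nil]
    rw [PySem.List.foldl_append_eq_flatMap, List.nil_append]
    apply List.flatMap_eq_nil_iff.mpr
    intro i _
    rw [PySem.List.pyRepeat_singleton]
    have ht : (if i ≥ (a.length : Int) - PySem.Int.mod (Int.negSucc M') (a.length : Int)
        then PySem.Int.floordiv (Int.negSucc M') (a.length : Int) + 1
        else PySem.Int.floordiv (Int.negSucc M') (a.length : Int)).toNat = 0 := by
      split <;> omega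
    rw [ht]
    simp
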